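-- pv_equiv track=rewrite | github.com/susanthgit/aguidetocloud-revamp | scripts/refresh-counters.py | match_views_to_tools
-- ===== SOURCE A (Python) =====
-- TOOL_PATHS = {
--     '/ai-news/': 'articles read',
--     '/prompts/': 'prompts copied',
--     '/cert-tracker/': 'guides viewed',
--     '/copilot-readiness/': 'readiness checks completed',
--     '/prompt-polisher/': 'prompts polished',
--     '/licensing/': 'plans compared',
--     '/m365-roadmap/': 'roadmap items tracked',
--     '/service-health/': 'health checks run',
--     '/roi-calculator/': 'ROI estimates generated',
--     '/copilot-matrix/': 'feature comparisons made',
--     '/deprecation-timeline/': 'timelines viewed',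
--     '/ai-mapper/': 'services mapped',
--     '/ai-showdown/': 'AI plans compared',
--     '/ca-builder/': 'policies built',
--     '/ps-builder/': 'commands generated',
--     '/migration-planner/': 'migrations planned',
--     '/prompt-guide/': 'techniques practiced',
--     '/world-clock/': 'meetings planned',
--     '/qr-generator/': 'QR codes created',
--     '/wifi-qr/': 'WiFi cards generated',
--     '/password-generator/': 'passwords generated',
--     '/image-compressor/': 'images compressed',
--     '/typing-test/': 'typing tests taken',
--     '/countdown/': 'countdowns created',
--     '/color-palette/': 'palettes generated',
--     '/pomodoro/': 'focus sessions started',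
--     '/site-analytics/': 'analytics views',
--     '/feedback/': 'feedback submissions',
-- }
--
-- def match_views_to_tools(ga4_data):
--     """Map GA4 page paths to tool URLs, aggregating sub-pages."""
--     tool_views = {}
--     for tool_path in TOOL_PATHS:
--         total = 0
--         # Normalize: match with and without trailing slash
--         norm = tool_path.rstrip('/')
--         for ga_path, views in ga4_data.items():
--             ga_norm = ga_path.rstrip('/')
--             if ga_norm == norm or ga_norm.startswith(norm + '/'):
--                 total += views
--         tool_views[tool_path] = total
--     return tool_views
-- ===== SOURCE B (Python) =====
-- TOOL_PATHS = {
--     '/ai-news/': 'articles read',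
--     '/prompts/': 'prompts copied',
--     '/cert-tracker/': 'guides viewed',
--     '/copilot-readiness/': 'readiness checks completed',
--     '/prompt-polisher/': 'prompts polished',
--     '/licensing/': 'plans compared',
--     '/m365-roadmap/': 'roadmap items tracked',
--     '/service-health/': 'health checks run',
--     '/roi-calculator/': 'ROI estimates generated',
--     '/copilot-matrix/': 'feature comparisons made',
--     '/deprecation-timeline/': 'timelines viewed',
--     '/ai-mapper/': 'services mapped',
--     '/ai-showdown/': 'AI plans compared',
--     '/ca-builder/': 'policies built',
--     '/ps-builder/': 'commands generated',
--     '/migration-planner/': 'migrations planned',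
--     '/prompt-guide/': 'techniques practiced',
--     '/world-clock/': 'meetings planned',
--     '/qr-generator/': 'QR codes created',
--     '/wifi-qr/': 'WiFi cards generated',
--     '/password-generator/': 'passwords generated',
--     '/image-compressor/': 'images compressed',
--     '/typing-test/': 'typing tests taken',
--     '/countdown/': 'countdowns created',
--     '/color-palette/': 'palettes generated',
--     '/pomodoro/': 'focus sessions started',
--     '/site-analytics/': 'analytics views',
--     '/feedback/': 'feedback submissions',
-- }
--
-- def match_views_to_tools(ga4_data):
--     """Map GA4 page paths to tool URLs, aggregating sub-pages."""
--     # Stage 1: one pass over ga4_data, summing views into a counter keyed by the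
--     # first path segment (the normalized path cut at its second '/').  Every tool
--     # prefix is a single segment '/<name>', so a GA4 path matches a tool exactly
--     # when its first segment equals that tool's normalized prefix.
--     counts = {}
--     for ga_path, views in ga4_data.items():
--         g = ga_path.rstrip('/')
--         i = g.find('/', 1)
--         key = g if i == -1 else g[:i]
--         counts[key] = counts.get(key, 0) + views
--     # Stage 2: one pass over the tools, reading each total out of the counter.
--     return {p: counts.get(p.rstrip('/'), 0) for p in TOOL_PATHS}
-- ===== Notes on version B (the rewrite author's own statement) =====
-- stated objective: faster
-- what changed: A scans all of ga4_data once per tool (28 nested scans of prefix tests); B makes one pass over ga4_data summing views into a counter keyed by each path's first segment, then one pass over the tools reading each total from the counter.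
import Mathlib
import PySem

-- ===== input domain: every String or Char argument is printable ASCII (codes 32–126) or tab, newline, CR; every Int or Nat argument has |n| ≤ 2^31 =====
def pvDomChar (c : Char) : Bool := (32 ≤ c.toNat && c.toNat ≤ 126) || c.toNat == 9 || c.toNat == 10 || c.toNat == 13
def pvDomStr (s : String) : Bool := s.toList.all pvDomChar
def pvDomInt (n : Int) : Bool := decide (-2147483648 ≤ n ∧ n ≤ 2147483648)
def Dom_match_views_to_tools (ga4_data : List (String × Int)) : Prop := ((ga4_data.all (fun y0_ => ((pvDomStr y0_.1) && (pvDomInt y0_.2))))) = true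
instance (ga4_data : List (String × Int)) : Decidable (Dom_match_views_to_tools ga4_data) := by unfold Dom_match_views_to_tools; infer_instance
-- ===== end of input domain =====

-- B replaces A's 28 nested scans of ga4_data by two staged passes: one pass summing views
-- into a counter keyed by each path's first segment, then one pass over the tools reading
-- the counter; equivalence is about the return value only.

-- hand port of s.rstrip('/') (PySem.Str.stripChars strips both sides): drop every trailing '/'; exact
def rstripSlash (s : String) : String := String.ofList ((s.toList.reverse.dropWhile (· == '/')).reverse)

-- ===== PORT A =====
-- module constant TOOL_PATHS as A uses it (keys iterated, values unused by the function)
def TOOL_PATHS : PySem.Dict String String := PySem.Dict.ofList [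
    ("/ai-news/", "articles read"),
    ("/prompts/", "prompts copied"),
    ("/cert-tracker/", "guides viewed"),
    ("/copilot-readiness/", "readiness checks completed"),
    ("/prompt-polisher/", "prompts polished"),
    ("/licensing/", "plans compared"),
    ("/m365-roadmap/", "roadmap items tracked"),
    ("/service-health/", "health checks run"),
    ("/roi-calculator/", "ROI estimates generated"),
    ("/copilot-matrix/", "feature comparisons made"),
    ("/deprecation-timeline/", "timelines viewed"),
    ("/ai-mapper/", "services mapped"),
    ("/ai-showdown/", "AI plans compared"),
    ("/ca-builder/", "policies built"),
    ("/ps-builder/", "commands generated"),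
    ("/migration-planner/", "migrations planned"),
    ("/prompt-guide/", "techniques practiced"),
    ("/world-clock/", "meetings planned"),
    ("/qr-generator/", "QR codes created"),
    ("/wifi-qr/", "WiFi cards generated"),
    ("/password-generator/", "passwords generated"),
    ("/image-compressor/", "images compressed"),
    ("/typing-test/", "typing tests taken"),
    ("/countdown/", "countdowns created"),
    ("/color-palette/", "palettes generated"),
    ("/pomodoro/", "focus sessions started"),
    ("/site-analytics/", "analytics views"),
    ("/feedback/", "feedback submissions")]

def match_views_to_tools (ga4_data : List (String × Int)) : List (String × Int) :=
  (TOOL_PATHS.keys.foldl (fun tool_views tool_path =>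
      let norm := rstripSlash tool_path
      let total := ga4_data.foldl (fun total q =>
          let ga_norm := rstripSlash q.1
          if ga_norm == norm || PySem.Str.startswith ga_norm (norm ++ "/") then total + q.2 else total)
        (0 : Int)
      tool_views.insert tool_path total)
    PySem.Dict.empty).items

-- ===== PORT B =====
-- 'for p in TOOL_PATHS' of Source B iterates the keys of the shared module dict;
-- ported as that key list (B never reads the values)
def toolKeys : List String := [
    "/ai-news/", "/prompts/", "/cert-tracker/", "/copilot-readiness/",
    "/prompt-polisher/", "/licensing/", "/m365-roadmap/", "/service-health/",
    "/roi-calculator/", "/copilot-matrix/", "/deprecation-timeline/", "/ai-mapper/",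
    "/ai-showdown/", "/ca-builder/", "/ps-builder/", "/migration-planner/",
    "/prompt-guide/", "/world-clock/", "/qr-generator/", "/wifi-qr/",
    "/password-generator/", "/image-compressor/", "/typing-test/", "/countdown/",
    "/color-palette/", "/pomodoro/", "/site-analytics/", "/feedback/"]

def match_views_to_tools_alt (ga4_data : List (String × Int)) : List (String × Int) :=
  let counts := ga4_data.foldl (fun counts q =>
      let g := rstripSlash q.1
      let i := PySem.Str.findFrom g "/" 1          -- g.find('/', 1)
      let key := if i == -1 then g else PySem.Str.slice g none (some i)   -- g[:i]
      counts.insert key (counts.getD key 0 + q.2)) PySem.Dict.empty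
  (toolKeys.foldl (fun d p => d.insert p (counts.getD (rstripSlash p) 0)) PySem.Dict.empty).items

-- ===== PRECONDITION & SPEC =====
def Spec_match_views_to_tools (ga4_data : List (String × Int)) (out : List (String × Int)) : Prop := out = match_views_to_tools_alt ga4_data
instance (ga4_data : List (String × Int)) (out : List (String × Int)) : Decidable (Spec_match_views_to_tools ga4_data out) := by unfold Spec_match_views_to_tools; infer_instance

-- ===== CLAIM (what is proved, stated in full; the proofs are below) =====
def Claim_equal_match_views_to_tools : Prop := ∀ (ga4_data : List (String × Int)), Dom_match_views_to_tools ga4_data → Spec_match_views_to_tools ga4_data (match_views_to_tools ga4_data)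

-- ===== LEMMAS AND PROOFS =====

-- proof-side abbreviations
def pvCondA (tp g : String) : Bool := g == rstripSlash tp || PySem.Str.startswith g (rstripSlash tp ++ "/")

def pvTotalA (ga4 : List (String × Int)) (tp : String) : Int :=
  ga4.foldl (fun t q => if pvCondA tp (rstripSlash q.1) then t + q.2 else t) 0

def pvKeyOf (g : String) : String :=
  let i := PySem.Str.findFrom g "/" 1
  if i == -1 then g else PySem.Str.slice g none (some i)

def pvCounts (ga4 : List (String × Int)) : PySem.Dict String Int :=
  ga4.foldl (fun c q => let k := pvKeyOf (rstripSlash q.1); c.insert k (c.getD k 0 + q.2)) PySem.Dict.empty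

-- A unfolded: its result is the tool list paired with A's per-tool inner-loop totals
lemma A_eq (ga4 : List (String × Int)) :
    match_views_to_tools ga4 = TOOL_PATHS.keys.map (fun tp => (tp, pvTotalA ga4 tp)) := by
  unfold match_views_to_tools pvTotalA pvCondA
  simp only []
  rw [PySem.Dict.items_foldl_insert_fresh TOOL_PATHS.keys (fun tp => tp)
        (fun tp => List.foldl (fun total q =>
            if (rstripSlash q.1 == rstripSlash tp ||
                PySem.Str.startswith (rstripSlash q.1) (rstripSlash tp ++ "/")) = true
            then total + q.2 else total) 0 ga4)
        PySem.Dict.empty (fun a _ => PySem.Dict.contains_empty a) (by decide)]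
  rfl

-- B unfolded likewise
lemma B_eq (ga4 : List (String × Int)) :
    match_views_to_tools_alt ga4
      = toolKeys.map (fun p => (p, (pvCounts ga4).getD (rstripSlash p) 0)) := by
  unfold match_views_to_tools_alt pvCounts pvKeyOf
  simp only []
  rw [PySem.Dict.items_foldl_insert_fresh toolKeys (fun p => p)
        (fun p => (List.foldl (fun c (q : String × Int) =>
            let k := let i := PySem.Str.findFrom (rstripSlash q.1) "/" 1
                     if i == -1 then rstripSlash q.1
                     else PySem.Str.slice (rstripSlash q.1) none (some i)
            c.insert k (c.getD k 0 + q.2)) PySem.Dict.empty ga4).getD (rstripSlash p) 0)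
        PySem.Dict.empty (fun a _ => PySem.Dict.contains_empty a) (by decide)]
  rfl

-- string-handling helper lemmas for the core characterisation
lemma single_prefix_drop (l : List Char) (j : Nat) (a : Char) :
    [a] <+: l.drop j ↔ ∃ h : j < l.length, l[j] = a := by
  by_cases hj : j < l.length
  · rw [List.drop_eq_getElem_cons hj]
    constructor
    · rintro ⟨t, ht⟩
      exact ⟨hj, by injection ht with h1 _; exact h1.symm⟩
    · rintro ⟨_, hh⟩
      exact ⟨List.drop (j+1) l, by rw [← hh]; rfl⟩
  · rw [List.drop_eq_nil_of_le (by omega)]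
    simp [hj]

lemma single_infix_iff (l : List Char) (a : Char) : [a] <:+: l ↔ a ∈ l := by
  constructor
  · intro h; exact h.mem (by simp)
  · intro h
    obtain ⟨s, t, h1, _⟩ := List.eq_append_cons_of_mem h
    exact ⟨s, t, by rw [h1]; simp⟩

-- char-level core: cutting at the second '/' finds exactly the matching one-segment prefix
lemma keyL_eq_iff (cs m : List Char) (hm : '/' ∉ m) :
    (if PySem.Chars.findFrom cs ['/'] 1 none == -1 then cs
     else cs.take (PySem.Chars.findFrom cs ['/'] 1 none).toNat) = '/' :: m
      ↔ (cs = '/' :: m ∨ ('/' :: m ++ ['/']) <+: cs) := by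
  by_cases hcs : cs = []
  · subst hcs
    rw [show PySem.Chars.findFrom [] ['/'] 1 none = -1 from rfl]
    simp
  · have hlen : 1 ≤ cs.length := by
      have := List.length_pos_iff.mpr hcs; omega
    rw [show (1 : Int) = ((1 : Nat) : Int) by simp,
        PySem.Chars.findFrom_natCast cs ['/'] 1 hlen]
    set d := cs.drop 1 with hd
    by_cases hf : PySem.Chars.find d ['/'] = -1
    · have hnotin : '/' ∉ d := by
        intro h
        exact ((PySem.Chars.find_eq_neg_one_iff d ['/']).mp hf) ((single_infix_iff d '/').mpr h)
      rw [if_pos (by simp [hf])]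
      constructor
      · exact Or.inl
      · rintro (h | ⟨t, ht⟩)
        · exact h
        · exfalso
          apply hnotin
          rw [hd, ← ht]
          simp
    · have hf0 : 0 ≤ PySem.Chars.find d ['/'] := by
        have := PySem.Chars.neg_one_le_find d ['/']; omega
      obtain ⟨hpre, hmin⟩ := PySem.Chars.find_spec hf0
      set f := (PySem.Chars.find d ['/']).toNat with hfdef
      obtain ⟨hflt, hdf⟩ := (single_prefix_drop d f '/').mp hpre
      have hdlen : d.length = cs.length - 1 := by simp [hd]
      have hcslt : 1 + f < cs.length := by omega
      have hcsf : cs[1 + f]'hcslt = '/' := by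
        simpa [hd, Nat.add_comm] using hdf
      rw [if_neg (by simp; omega), if_neg hf]
      have htoNat : (((1 : Nat) : Int) + PySem.Chars.find d ['/']).toNat = 1 + f := by
        simp only [Nat.cast_one]; omega
      rw [htoNat]
      constructor
      · intro h
        right
        have hlen2 : m.length + 1 = 1 + f := by
          have := congrArg List.length h
          simpa [Nat.min_eq_left (le_of_lt hcslt)] using this.symm
        refine ⟨cs.drop (1 + f + 1), ?_⟩
        have hsplit : cs.take (1+f) ++ cs[1+f]'hcslt :: cs.drop (1+f+1) = cs := by
          rw [← List.drop_eq_getElem_cons hcslt]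
          exact List.take_append_drop _ _
        calc '/' :: m ++ ['/'] ++ cs.drop (1+f+1)
            = cs.take (1+f) ++ cs[1+f]'hcslt :: cs.drop (1+f+1) := by rw [h, hcsf]; simp
          _ = cs := hsplit
      · rintro (h | ⟨t, ht⟩)
        · exfalso
          apply hm
          have hdm : d = m := by rw [hd, h]; rfl
          exact (single_infix_iff m '/').mp
            (hdm ▸ (PySem.Chars.find_nonneg_iff d ['/']).mp hf0)
        · have hcseq : cs = '/' :: (m ++ '/' :: t) := by
            rw [← ht]; simp
          have hdeq : d = m ++ '/' :: t := by rw [hd, hcseq]; rfl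
          have hfeq : f = m.length := by
            rcases Nat.lt_trichotomy f m.length with hlt | he | hgt
            · exfalso
              apply hm
              have h1 : d[f]'hflt = m[f]'hlt := by
                simp [hdeq, hlt]
              have : ('/' : Char) ∈ m := by
                rw [← hdf, h1]; exact List.getElem_mem _
              exact this
            · exact he
            · exfalso
              apply hmin m.length hgt
              rw [hdeq, List.drop_left]
              exact ⟨t, rfl⟩
          rw [hfeq, hcseq]
          rw [show (1 + m.length) = ('/' :: m).length from by simp [Nat.add_comm]]
          rw [show ('/' :: (m ++ '/' :: t)) = ('/' :: m) ++ '/' :: t from by simp]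
          exact List.take_left

lemma findFrom_one_nonneg (cs : List Char) (h : PySem.Chars.findFrom cs ['/'] 1 none ≠ -1) :
    0 ≤ PySem.Chars.findFrom cs ['/'] 1 none := by
  by_cases hcs : cs = []
  · subst hcs; exact absurd rfl h
  · have hlen : 1 ≤ cs.length := by have := List.length_pos_iff.mpr hcs; omega
    rw [show (1:Int) = ((1:Nat):Int) by simp, PySem.Chars.findFrom_natCast cs ['/'] 1 hlen] at h ⊢
    by_cases hf : PySem.Chars.find (cs.drop 1) ['/'] = -1
    · rw [if_pos hf] at h; exact absurd rfl h
    · rw [if_neg hf]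
      have := PySem.Chars.neg_one_le_find (cs.drop 1) ['/']
      omega

-- String-level form of the characterisation, for a one-segment prefix n = '/' :: m
lemma keyOf_eq_iff (g n : String) (m : List Char) (hn : n.toList = '/' :: m) (hm : '/' ∉ m) :
    pvKeyOf g = n ↔ (g == n || PySem.Str.startswith g (n ++ "/")) = true := by
  have hslash : ("/" : String).toList = ['/'] := rfl
  have hkey : (pvKeyOf g).toList =
      (if PySem.Chars.findFrom g.toList ['/'] 1 none == -1 then g.toList
       else g.toList.take (PySem.Chars.findFrom g.toList ['/'] 1 none).toNat) := by
    unfold pvKeyOf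
    rw [apply_ite String.toList]
    by_cases hc : PySem.Chars.findFrom g.toList ['/'] 1 none == -1
    · simp only [PySem.Str.findFrom_eq, hslash, hc, if_true]
    · simp only [PySem.Str.findFrom_eq, hslash, hc]
      rw [PySem.Str.toList_slice]
      rw [PySem.Chars.slice_eq_listSlice]
      exact PySem.List.slice_to _ (findFrom_one_nonneg _ (by simpa using hc))
  constructor
  · intro h
    have heq : (g == n || PySem.Str.startswith g (n ++ "/")) = true
        ↔ (g.toList = '/' :: m ∨ ('/' :: m ++ ['/']) <+: g.toList) := by
      rw [Bool.or_eq_true, beq_iff_eq, PySem.Str.startswith_eq, String.toList_append, hn, hslash]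
      rw [PySem.Chars.startswith_iff, String.ext_iff, hn]
    rw [heq, ← keyL_eq_iff _ _ hm, ← hkey, h, hn]
  · intro h
    have h2 : (g.toList = '/' :: m ∨ ('/' :: m ++ ['/']) <+: g.toList) := by
      rw [Bool.or_eq_true, beq_iff_eq, PySem.Str.startswith_eq, String.toList_append, hn, hslash,
          PySem.Chars.startswith_iff, String.ext_iff, hn] at h
      exact h
    rw [String.ext_iff, hkey, hn]
    exact (keyL_eq_iff _ _ hm).mpr h2

-- facts about the literal constants, by computation
lemma keys_eq_toolKeys : TOOL_PATHS.keys = toolKeys := by decide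
lemma norm_shape : ∀ tp ∈ toolKeys,
    (rstripSlash tp).toList ≠ [] ∧ (rstripSlash tp).toList.head? = some '/' ∧
      '/' ∉ (rstripSlash tp).toList.tail := by decide

-- B's counter, read at any key: the sum of views of the entries whose first segment is that key
lemma counts_getD (ga4 : List (String × Int)) (c : PySem.Dict String Int) (k : String) :
    (ga4.foldl (fun c q => let kq := pvKeyOf (rstripSlash q.1); c.insert kq (c.getD kq 0 + q.2)) c).getD k 0
      = ga4.foldl (fun t q => if pvKeyOf (rstripSlash q.1) = k then t + q.2 else t) (c.getD k 0) := by
  induction ga4 generalizing c with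
  | nil => rfl
  | cons q ga4 ih =>
    simp only [List.foldl_cons]
    rw [ih]
    apply congrArg (fun z => List.foldl (fun t q => if pvKeyOf (rstripSlash q.1) = k then t + q.2 else t) z ga4)
    rw [PySem.Dict.getD_insert]
    by_cases he : k = pvKeyOf (rstripSlash q.1)
    · rw [if_pos he, if_pos he.symm, he]
    · rw [if_neg he, if_neg (fun h => he h.symm)]

-- pointwise bridge: the counter entry at a tool's normalized prefix is A's inner-loop total
lemma counts_eq_total (ga4 : List (String × Int)) (tp : String) (htp : tp ∈ toolKeys) :
    (pvCounts ga4).getD (rstripSlash tp) 0 = pvTotalA ga4 tp := by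
  obtain ⟨hne, hhead, htail⟩ := norm_shape tp htp
  have hn : (rstripSlash tp).toList = '/' :: (rstripSlash tp).toList.tail := by
    cases hcl : (rstripSlash tp).toList with
    | nil => exact absurd hcl hne
    | cons a l =>
      rw [hcl] at hhead
      simp at hhead
      rw [hhead]
      rfl
  unfold pvCounts pvTotalA
  rw [counts_getD, PySem.Dict.getD_empty]
  refine PySem.List.foldl_congr_mem ga4 _ _ 0 (fun t q _ => ?_)
  by_cases hc : pvCondA tp (rstripSlash q.1) = true
  · rw [if_pos ((keyOf_eq_iff _ _ _ hn htail).mpr hc), if_pos hc]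
  · rw [if_neg (fun h => hc ((keyOf_eq_iff _ _ _ hn htail).mp h)),
        if_neg (fun h => hc h)]

-- ===== VERDICT (by name: the statement is the Claim_ definition above) =====
theorem match_views_to_tools_spec : Claim_equal_match_views_to_tools := by
  intro ga4 _
  show match_views_to_tools ga4 = match_views_to_tools_alt ga4
  rw [A_eq, B_eq, keys_eq_toolKeys]
  exact List.map_congr_left (fun tp htp => by rw [counts_eq_total ga4 tp htp])
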